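-- pv_equiv track=rewrite | github.com/YUKI2eN3e/pyproject-cli | src/pyproject_cli/templates/pyproject.py | _get_package_name
-- ===== SOURCE A (Python) =====
-- def _get_package_name(package_path: str) -> str:
--     if "/" in package_path:
--         return package_path.split("/")[-1]
--     elif "\\" in package_path:
--         package_path = package_path.replace("\\", "/")
--         while "//" in package_path:
--             package_path = package_path.replace("//", "/")
--         return _get_package_name(package_path)
--     elif "." in package_path:
--         package_path = package_path.replace(".", "/")
--         while "//" in package_path:
--             package_path = package_path.replace("//", "/")
--         return _get_package_name(package_path)
--     raise ValueError(package_path)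
-- ===== SOURCE B (Python) =====
-- def _get_package_name(package_path: str) -> str:
--     # A always returns the piece after the last occurrence of the first
--     # separator present (checked in the order "/", "\", "."); the "//"
--     # collapse loops never change that suffix, so one split suffices.
--     for sep in ("/", "\\", "."):
--         if sep in package_path:
--             return package_path.split(sep)[-1]
--     raise ValueError(package_path)
-- ===== Notes on version B (the rewrite author's own statement) =====
-- stated objective: simpler
-- what changed: Replaced A's recursion with replace()+'//'-collapse loops by a single flat loop over the ordered separators ('/', '\', '.') that splits once on the first separator present and returns the last piece; the collapse never affects the suffix after the last separator.
import Mathlib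
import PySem

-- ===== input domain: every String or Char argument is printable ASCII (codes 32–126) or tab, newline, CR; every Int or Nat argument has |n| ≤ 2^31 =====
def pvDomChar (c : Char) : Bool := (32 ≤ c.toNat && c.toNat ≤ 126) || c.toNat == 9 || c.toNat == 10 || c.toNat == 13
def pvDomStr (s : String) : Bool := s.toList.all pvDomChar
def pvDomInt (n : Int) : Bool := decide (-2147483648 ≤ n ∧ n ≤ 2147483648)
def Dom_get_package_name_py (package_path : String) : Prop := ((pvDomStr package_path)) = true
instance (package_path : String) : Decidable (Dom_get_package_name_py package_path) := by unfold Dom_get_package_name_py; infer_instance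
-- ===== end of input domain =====

-- B replaces A's recursion + "//"-collapse loops by one flat loop over the ordered
-- separators ('/', '\', '.'): split once on the first separator present, take the last
-- piece (objective: simpler).


-- ===== PORT A =====

-- shared helper: Python's parts[-1] (both sources index the split result with [-1])
def pyLastPart (parts : List (List Char)) : List Char :=
  (PySem.List.pyGet? parts (-1)).getD []

-- the 'while "//" in package_path: package_path = package_path.replace("//", "/")' loop;
-- fuel only makes the recursion total (each real iteration strictly shortens the string,
-- so s.length iterations always suffice)
def collapseA : Nat → List Char → List Char
  | 0, s => s
  | fuel + 1, s =>
      if PySem.Chars.isIn ['/', '/'] s then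
        collapseA fuel (PySem.Chars.replace s ['/', '/'] ['/'])
      else s

-- _get_package_name's branch structure; fuel only makes the recursion total (the Python
-- recursion is at most 2 deep: after a '\' or '.' branch the string contains '/')
def goA : Nat → List Char → List Char
  | 0, s => s
  | fuel + 1, s =>
      if PySem.Chars.isIn ['/'] s then
        pyLastPart (PySem.Chars.splitOn s ['/'])
      else if PySem.Chars.isIn ['\\'] s then
        let s1 := PySem.Chars.replace s ['\\'] ['/']
        goA fuel (collapseA s1.length s1)
      else if PySem.Chars.isIn ['.'] s then
        let s1 := PySem.Chars.replace s ['.'] ['/']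
        goA fuel (collapseA s1.length s1)
      else s  -- Python: raise ValueError(package_path)  (excluded by Pre_)

def get_package_name_py (package_path : String) : String :=
  String.ofList (goA 2 package_path.toList)

-- ===== PORT B =====

def get_package_name_py_alt (package_path : String) : String :=
  match ['/', '\\', '.'].find? (fun c => PySem.Chars.isIn [c] package_path.toList) with
  | some c => String.ofList (pyLastPart (PySem.Chars.splitOn package_path.toList [c]))
  | none => package_path  -- Python: raise ValueError(package_path)  (excluded by Pre_)

-- ===== PRECONDITION & SPEC =====

-- Pre_ excludes exactly the strings containing none of '/', '\', '.', on which the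
-- Python A (and B) raise ValueError.
def Pre_get_package_name_py (package_path : String) : Prop :=
  '/' ∈ package_path.toList ∨ '\\' ∈ package_path.toList ∨ '.' ∈ package_path.toList
instance (package_path : String) : Decidable (Pre_get_package_name_py package_path) := by
  unfold Pre_get_package_name_py; infer_instance

def pvWitness_get_package_name_py : String := "pkg.sub"

def Spec_get_package_name_py (package_path : String) (out : String) : Prop :=
  out = get_package_name_py_alt package_path
instance (package_path : String) (out : String) : Decidable (Spec_get_package_name_py package_path out) := by
  unfold Spec_get_package_name_py; infer_instance

-- ===== CLAIM (what is proved, stated in full; the proofs are below) =====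
def Claim_equal_get_package_name_py : Prop :=
  ∀ (package_path : String), Dom_get_package_name_py package_path →
    Pre_get_package_name_py package_path →
    Spec_get_package_name_py package_path (get_package_name_py package_path)

-- ===== LEMMAS AND PROOFS =====

-- proof-side helpers -----------------------------------------------------------

-- simple model of s.split(c) (single-char separator), left to right
def mySplit (c : Char) : List Char → List Char → List (List Char)
  | [], cur => [cur.reverse]
  | x :: t, cur => if x = c then cur.reverse :: mySplit c t [] else mySplit c t (x :: cur)

-- the suffix of s after the last occurrence of c (s itself if c ∉ s)
def afterLast (c : Char) : List Char → List Char
  | [] => []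
  | x :: t => if c ∈ t then afterLast c t else if x = c then t else x :: t

-- one pass of replace("//", "/")
def collRepl : List Char → List Char
  | [] => []
  | [x] => [x]
  | x :: y :: t => if x = '/' ∧ y = '/' then '/' :: collRepl t else x :: collRepl (y :: t)

-- single-char substitution (replace(a, "/"))
def subst (a : Char) (x : Char) : Char := if x = a then '/' else x

-- bridge lemmas ----------------------------------------------------------------

theorem afterLast_cons (c x : Char) (t : List Char) :
    afterLast c (x :: t) = if c ∈ t then afterLast c t else if x = c then t else x :: t := by
  rw [afterLast]

theorem afterLast_cons_of_mem (c x : Char) {t : List Char} (h : c ∈ t) :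
    afterLast c (x :: t) = afterLast c t := by
  rw [afterLast_cons, if_pos h]

theorem mem_iff_singleton_infix {c : Char} {l : List Char} : [c] <:+: l ↔ c ∈ l := by
  constructor
  · intro h; exact h.sublist.subset (by simp)
  · intro h
    obtain ⟨s, t, rfl⟩ := List.append_of_mem h
    exact ⟨s, t, by simp⟩

theorem isIn_singleton (c : Char) (l : List Char) :
    PySem.Chars.isIn [c] l = true ↔ c ∈ l := by
  rw [PySem.Chars.isIn_iff_infix, mem_iff_singleton_infix]

theorem splitOn_go_eq (c : Char) (fuel : Nat) (l cur : List Char) (acc : List (List Char))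
    (h : l.length ≤ fuel) :
    PySem.Chars.splitOn.go [c] fuel l cur acc = acc.reverse ++ mySplit c l cur := by
  induction fuel generalizing l cur acc with
  | zero =>
      have : l = [] := by simpa using h
      subst this
      simp [PySem.Chars.splitOn.go, mySplit]
  | succ fuel ih =>
      cases l with
      | nil => simp [PySem.Chars.splitOn.go, mySplit]
      | cons x t =>
          by_cases hx : x = c
          · subst hx
            simp only [PySem.Chars.splitOn.go, mySplit]
            rw [if_pos (by simp)]
            simp only [if_true, List.length_singleton, List.drop_succ_cons, List.drop_zero]
            rw [ih t [] (cur.reverse :: acc) (by simpa using Nat.le_of_succ_le_succ h)]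
            simp
          · simp only [PySem.Chars.splitOn.go, mySplit]
            rw [if_neg (by simp [List.isPrefixOf]; intro hh; exact hx hh.symm),
              if_neg hx]
            exact ih t (x :: cur) acc (by simpa using Nat.le_of_succ_le_succ h)

theorem splitOn_eq_mySplit (c : Char) (l : List Char) :
    PySem.Chars.splitOn l [c] = mySplit c l [] := by
  unfold PySem.Chars.splitOn
  rw [splitOn_go_eq c (l.length + 1) l [] [] (Nat.le_succ _)]
  simp

theorem replace_go_single (a : Char) (fuel : Nat) (l acc : List Char)
    (h : l.length ≤ fuel) :
    PySem.Chars.replace.go [a] ['/'] fuel l acc = acc.reverse ++ l.map (subst a) := by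
  induction fuel generalizing l acc with
  | zero =>
      have : l = [] := by simpa using h
      subst this
      simp [PySem.Chars.replace.go]
  | succ fuel ih =>
      cases l with
      | nil => simp [PySem.Chars.replace.go]
      | cons x t =>
          by_cases hx : x = a
          · subst hx
            simp only [PySem.Chars.replace.go]
            rw [if_pos (by simp [List.isPrefixOf])]
            simp only [List.length_singleton, List.drop_succ_cons, List.drop_zero]
            rw [ih t _ (by simpa using Nat.le_of_succ_le_succ h)]
            simp [subst]
          · simp only [PySem.Chars.replace.go]
            rw [if_neg (by simp [List.isPrefixOf]; intro hh; exact hx hh.symm)]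
            rw [ih t _ (by simpa using Nat.le_of_succ_le_succ h)]
            simp [subst, hx]

theorem replace_single (a : Char) (l : List Char) :
    PySem.Chars.replace l [a] ['/'] = l.map (subst a) := by
  unfold PySem.Chars.replace
  rw [if_neg (by simp)]
  rw [replace_go_single a l.length l [] le_rfl]
  simp

theorem replace_go_dslash (fuel : Nat) (l acc : List Char) (h : l.length ≤ fuel) :
    PySem.Chars.replace.go ['/', '/'] ['/'] fuel l acc = acc.reverse ++ collRepl l := by
  induction fuel using Nat.strong_induction_on generalizing l acc with
  | _ fuel ih =>
    match fuel, l with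
    | 0, l =>
        have : l = [] := by simpa using h
        subst this
        simp [PySem.Chars.replace.go, collRepl]
    | fuel + 1, [] => simp [PySem.Chars.replace.go, collRepl]
    | fuel + 1, [x] =>
        simp only [PySem.Chars.replace.go]
        rw [if_neg (by simp [List.isPrefixOf])]
        rw [ih fuel (Nat.lt_succ_self _) [] _ (by simp)]
        simp [collRepl]
    | fuel + 1, x :: y :: t =>
        by_cases hp : x = '/' ∧ y = '/'
        · obtain ⟨rfl, rfl⟩ := hp
          simp only [PySem.Chars.replace.go]
          rw [if_pos (by simp [List.isPrefixOf])]
          simp only [List.length_cons, List.length_nil, List.drop_succ_cons, List.drop_zero]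
          rw [ih fuel (Nat.lt_succ_self _) t _ (by simp at h; omega)]
          rw [collRepl, if_pos ⟨rfl, rfl⟩]
          simp
        · simp only [PySem.Chars.replace.go]
          rw [if_neg (by simp [List.isPrefixOf]; intro h1 h2; exact hp ⟨h1.symm, h2.symm⟩)]
          rw [ih fuel (Nat.lt_succ_self _) (y :: t) _ (by simp at h ⊢; omega)]
          rw [collRepl, if_neg hp]
          simp

theorem replace_dslash (l : List Char) :
    PySem.Chars.replace l ['/', '/'] ['/'] = collRepl l := by
  unfold PySem.Chars.replace
  rw [if_neg (by simp)]
  rw [replace_go_dslash l.length l [] le_rfl]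
  simp

theorem mem_collRepl (c : Char) (l : List Char) : c ∈ collRepl l ↔ c ∈ l := by
  induction l using collRepl.induct with
  | case1 => simp [collRepl]
  | case2 x => simp [collRepl]
  | case3 x y t hp ih =>
      obtain ⟨rfl, rfl⟩ := hp
      rw [collRepl, if_pos ⟨rfl, rfl⟩]
      simp [ih]
  | case4 x y t hp ih =>
      rw [collRepl, if_neg hp]
      simp [ih]

theorem collRepl_of_no_slash {l : List Char} (h : '/' ∉ l) : collRepl l = l := by
  induction l using collRepl.induct with
  | case1 => rfl
  | case2 x => rfl
  | case3 x y t hp ih => obtain ⟨rfl, _⟩ := hp; simp at h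
  | case4 x y t hp ih =>
      rw [collRepl, if_neg hp, ih (by simp at h ⊢; tauto)]

theorem afterLast_collRepl (l : List Char) :
    afterLast '/' (collRepl l) = afterLast '/' l := by
  induction l using collRepl.induct with
  | case1 => rfl
  | case2 x => rfl
  | case3 x y t hp ih =>
      obtain ⟨rfl, rfl⟩ := hp
      rw [collRepl, if_pos ⟨rfl, rfl⟩]
      by_cases ht : '/' ∈ t
      · rw [afterLast_cons_of_mem _ _ ((mem_collRepl _ _).mpr ht), ih,
            afterLast_cons_of_mem _ _ (List.mem_cons_of_mem _ ht),
            afterLast_cons_of_mem _ _ ht]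
      · rw [collRepl_of_no_slash ht]
        rw [afterLast_cons, if_neg ht, if_pos rfl,
          afterLast_cons_of_mem _ _ (by simp), afterLast_cons, if_neg ht, if_pos rfl]
  | case4 x y t hp ih =>
      rw [collRepl, if_neg hp]
      by_cases ht : '/' ∈ y :: t
      · rw [afterLast_cons_of_mem _ _ ((mem_collRepl _ _).mpr ht), ih,
            afterLast_cons_of_mem _ _ ht]
      · rw [collRepl_of_no_slash ht]

theorem mem_collapseA (c : Char) (fuel : Nat) (l : List Char) :
    c ∈ collapseA fuel l ↔ c ∈ l := by
  induction fuel generalizing l with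
  | zero => rfl
  | succ fuel ih =>
      rw [collapseA]
      split
      · rw [ih, replace_dslash, mem_collRepl]
      · rfl

theorem afterLast_collapseA (fuel : Nat) (l : List Char) :
    afterLast '/' (collapseA fuel l) = afterLast '/' l := by
  induction fuel generalizing l with
  | zero => rfl
  | succ fuel ih =>
      rw [collapseA]
      split
      · rw [ih, replace_dslash, afterLast_collRepl]
      · rfl

theorem mem_slash_map_subst {a : Char} {l : List Char} (ha : a ∈ l) :
    '/' ∈ l.map (subst a) :=
  List.mem_map.mpr ⟨a, ha, by simp [subst]⟩

theorem afterLast_map_subst {a : Char} {l : List Char}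
    (hns : '/' ∉ l) (ha : a ∈ l) :
    afterLast '/' (l.map (subst a)) = afterLast a l := by
  induction l with
  | nil => cases ha
  | cons x t ih =>
      have hnst : '/' ∉ t := fun h => hns (List.mem_cons_of_mem _ h)
      have hmem : '/' ∈ t.map (subst a) ↔ a ∈ t := by
        constructor
        · intro h
          obtain ⟨y, hy, hsy⟩ := List.mem_map.mp h
          by_cases hya : y = a
          · rwa [hya] at hy
          · simp [subst, hya] at hsy; exact absurd (hsy ▸ hy) hnst
        · exact mem_slash_map_subst
      by_cases hat : a ∈ t
      · rw [List.map_cons, afterLast_cons_of_mem _ _ (hmem.mpr hat), ih hnst hat,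
            afterLast_cons_of_mem _ _ hat]
      · have hxa : x = a := by
          rcases List.mem_cons.mp ha with h | h
          · exact h.symm
          · exact absurd h hat
        subst hxa
        have hid : t.map (subst x) = t := by
          rw [List.map_congr_left (g := id)
            (fun b hb => by
              by_cases hbx : b = x
              · exact absurd (hbx ▸ hb) hat
              · simp [subst, hbx]),
            List.map_id]
        rw [List.map_cons, afterLast_cons, if_neg (fun h => hat (hmem.mp h)),
          if_pos (by simp [subst]), hid,
          afterLast_cons, if_neg hat, if_pos rfl]

theorem pyGet?_neg_one {α : Type} (l : List α) (h : l ≠ []) :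
    PySem.List.pyGet? l (-1) = l.getLast? := by
  have hl : 0 < l.length := List.length_pos_iff.mpr h
  unfold PySem.List.pyGet? PySem.List.pyIdx?
  rw [if_neg (by norm_num), if_pos (by omega)]
  simp only [Option.bind_some]
  rw [List.getLast?_eq_getElem?]
  congr 1

theorem mySplit_ne_nil (c : Char) (l cur : List Char) : mySplit c l cur ≠ [] := by
  induction l generalizing cur with
  | nil => simp [mySplit]
  | cons x t ih =>
      rw [mySplit]
      split
      · simp
      · exact ih _

theorem pyLastPart_cons {a : List Char} {l : List (List Char)} (h : l ≠ []) :
    pyLastPart (a :: l) = pyLastPart l := by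
  unfold pyLastPart
  rw [pyGet?_neg_one _ (by simp), pyGet?_neg_one _ h]
  cases l with
  | nil => exact absurd rfl h
  | cons b t => rw [List.getLast?_cons_cons]

theorem pyLastPart_singleton (a : List Char) : pyLastPart [a] = a := by
  unfold pyLastPart
  rw [pyGet?_neg_one _ (by simp)]
  rfl

theorem pyLastPart_mySplit (c : Char) (l cur : List Char) :
    pyLastPart (mySplit c l cur) =
      if c ∈ l then afterLast c l else cur.reverse ++ l := by
  induction l generalizing cur with
  | nil => rw [mySplit, pyLastPart_singleton]; simp
  | cons x t ih =>
      by_cases hx : x = c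
      · subst hx
        rw [mySplit, if_pos rfl, pyLastPart_cons (mySplit_ne_nil _ _ _), ih]
        by_cases ht : x ∈ t
        · rw [if_pos ht, if_pos (List.mem_cons.mpr (Or.inr ht)),
            afterLast_cons_of_mem _ _ ht]
        · rw [if_neg ht, if_pos (List.mem_cons.mpr (Or.inl rfl)),
            afterLast_cons, if_neg ht, if_pos rfl]
          simp
      · rw [mySplit, if_neg hx, ih]
        have hmem : c ∈ x :: t ↔ c ∈ t := by
          simp [List.mem_cons]
          intro hc; exact absurd hc.symm hx
        by_cases ht : c ∈ t
        · rw [if_pos ht, if_pos (hmem.mpr ht), afterLast_cons_of_mem _ _ ht]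
        · rw [if_neg ht, if_neg (fun h => ht (hmem.mp h))]
          simp

-- the last '/'-piece of the transformed string is the last a-piece of the original
theorem branch_eq (a : Char) (s : List Char)
    (hns : '/' ∉ s) (ha : a ∈ s) :
    pyLastPart (PySem.Chars.splitOn
        (collapseA (PySem.Chars.replace s [a] ['/']).length
          (PySem.Chars.replace s [a] ['/'])) ['/'])
      = pyLastPart (PySem.Chars.splitOn s [a]) := by
  set s1 := PySem.Chars.replace s [a] ['/'] with hs1
  have hmap : s1 = s.map (subst a) := replace_single a s
  have hsl1 : '/' ∈ s1 := hmap ▸ mem_slash_map_subst ha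
  have hsl2 : '/' ∈ collapseA s1.length s1 := (mem_collapseA _ _ _).mpr hsl1
  rw [splitOn_eq_mySplit, splitOn_eq_mySplit, pyLastPart_mySplit, pyLastPart_mySplit,
    if_pos hsl2, if_pos ha, afterLast_collapseA, hmap, afterLast_map_subst hns ha]

-- main case analysis
theorem main_eq (s : List Char)
    (hpre : '/' ∈ s ∨ '\\' ∈ s ∨ '.' ∈ s) :
    goA 2 s = (match ['/', '\\', '.'].find? (fun c => PySem.Chars.isIn [c] s) with
               | some c => pyLastPart (PySem.Chars.splitOn s [c])
               | none => s) := by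
  by_cases h1 : '/' ∈ s
  · rw [goA, if_pos ((isIn_singleton _ _).mpr h1)]
    have hf : List.find? (fun c => PySem.Chars.isIn [c] s) ['/', '\\', '.'] = some '/' := by
      simp [(isIn_singleton '/' s).mpr h1]
    rw [hf]
  · have hb1 : PySem.Chars.isIn ['/'] s = false :=
      Bool.eq_false_iff.mpr (fun h => h1 ((isIn_singleton _ _).mp h))
    by_cases h2 : '\\' ∈ s
    · rw [goA, if_neg (by simp [hb1]), if_pos ((isIn_singleton _ _).mpr h2)]
      have hsl2 : '/' ∈ collapseA (PySem.Chars.replace s ['\\'] ['/']).length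
          (PySem.Chars.replace s ['\\'] ['/']) :=
        (mem_collapseA _ _ _).mpr (replace_single '\\' s ▸ mem_slash_map_subst h2)
      rw [goA, if_pos ((isIn_singleton _ _).mpr hsl2)]
      rw [branch_eq '\\' s h1 h2]
      have hf : List.find? (fun c => PySem.Chars.isIn [c] s) ['/', '\\', '.'] = some '\\' := by
        simp [hb1, (isIn_singleton '\\' s).mpr h2]
      rw [hf]
    · have hb2 : PySem.Chars.isIn ['\\'] s = false :=
        Bool.eq_false_iff.mpr (fun h => h2 ((isIn_singleton _ _).mp h))
      have h3 : '.' ∈ s := by tauto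
      rw [goA, if_neg (by simp [hb1]), if_neg (by simp [hb2]),
        if_pos ((isIn_singleton _ _).mpr h3)]
      have hsl2 : '/' ∈ collapseA (PySem.Chars.replace s ['.'] ['/']).length
          (PySem.Chars.replace s ['.'] ['/']) :=
        (mem_collapseA _ _ _).mpr (replace_single '.' s ▸ mem_slash_map_subst h3)
      rw [goA, if_pos ((isIn_singleton _ _).mpr hsl2)]
      rw [branch_eq '.' s h1 h3]
      have hf : List.find? (fun c => PySem.Chars.isIn [c] s) ['/', '\\', '.'] = some '.' := by
        simp [hb1, hb2, (isIn_singleton '.' s).mpr h3]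
      rw [hf]

-- ===== VERDICT (by name: the statement is the Claim_ definition above) =====
theorem get_package_name_py_spec : Claim_equal_get_package_name_py := by
  intro p _ hpre
  unfold Spec_get_package_name_py get_package_name_py get_package_name_py_alt
  rw [main_eq p.toList hpre]
  cases h : ['/', '\\', '.'].find? (fun c => PySem.Chars.isIn [c] p.toList) with
  | some c => simp
  | none =>
      exfalso
      have := List.find?_eq_none.mp h
      rcases hpre with hp | hp | hp
      · exact absurd ((isIn_singleton _ _).mpr hp) (by simpa using this '/' (by simp))
      · exact absurd ((isIn_singleton _ _).mpr hp) (by simpa using this '\\' (by simp))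
      · exact absurd ((isIn_singleton _ _).mpr hp) (by simpa using this '.' (by simp))
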